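-- pv_equiv track=rewrite | github.com/charlie-j/symbolic-hash-models | Tamarin-Case-Studies/Concatenation/auto_paper.py | apply_redundancy_col
-- ===== SOURCE A (Python) =====
-- redundancy_col = {
--     "CP" : ["Ex"],  # ("CP" => "Ex")
--     "IP": ["Ex"],   # ("IP" => "Ex")
--     "AllCol" : ["CP", "IP", "PI1", "PI2", "Ex"], # ("AllCol" => all colisions...), and we say that AllCol has priority over CR
--     }
--
-- def apply_redundancy_col(scen):
--     res = list(scen)
--     for key in redundancy_col:
--         if key in res:
--             for dropped in redundancy_col[key]:
--                 try:
--                     res.remove(dropped)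
--                 except: ()
--     res.sort()
--     return res
-- ===== SOURCE B (Python) =====
-- redundancy_col = {
--     "CP" : ["Ex"],
--     "IP": ["Ex"],
--     "AllCol" : ["CP", "IP", "PI1", "PI2", "Ex"],
--     }
--
-- def apply_redundancy_col(scen):
--     # budget[tag] = how many occurrences of tag must be dropped
--     budget = {}
--     for key, dropped in redundancy_col.items():
--         if key in scen:
--             for tag in dropped:
--                 budget[tag] = budget.get(tag, 0) + 1
--     out = []
--     for x in scen:
--         if budget.get(x, 0) > 0:
--             budget[x] = budget[x] - 1
--         else:
--             out.append(x)
--     return sorted(out)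
-- ===== Notes on version B (the rewrite author's own statement) =====
-- stated objective: alternative
-- what changed: Replaces the sequence of in-place list.remove scans (one per redundant tag) with a single frequency-budget pass: a dict of removal counts is built from the keys present in scen, then one filter pass over scen drops each tag up to its budget, and the survivors are sorted.
import Mathlib
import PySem

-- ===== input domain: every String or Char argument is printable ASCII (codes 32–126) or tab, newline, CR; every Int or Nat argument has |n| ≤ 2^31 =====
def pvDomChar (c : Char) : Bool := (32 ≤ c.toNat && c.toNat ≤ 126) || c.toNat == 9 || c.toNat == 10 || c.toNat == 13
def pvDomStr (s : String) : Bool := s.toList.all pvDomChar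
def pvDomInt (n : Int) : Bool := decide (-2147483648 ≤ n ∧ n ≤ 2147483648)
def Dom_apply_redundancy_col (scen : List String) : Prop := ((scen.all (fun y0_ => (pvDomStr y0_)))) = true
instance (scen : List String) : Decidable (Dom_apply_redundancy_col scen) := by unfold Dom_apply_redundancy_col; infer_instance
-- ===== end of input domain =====

-- B replaces A's repeated in-place list.remove scans by a one-pass frequency-budget
-- filter followed by sorted(); same return value, no speed claim (A only mutates its
-- local copy, so there is no observable mutation of the argument).


-- ===== PORT A =====
-- the module-level dict redundancy_col
def redundancy_col : PySem.Dict String (List String) :=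
  PySem.Dict.ofList
    [("CP", ["Ex"]), ("IP", ["Ex"]), ("AllCol", ["CP", "IP", "PI1", "PI2", "Ex"])]

-- 'try: res.remove(dropped) except: ()' — remove first occurrence, swallow ValueError
def removeTry (res : List String) (dropped : String) : List String :=
  match PySem.List.remove? res dropped with
  | some r => r
  | none   => res

def apply_redundancy_col (scen : List String) : List String :=
  let res := scen
  let res := (PySem.Dict.keys redundancy_col).foldl
    (fun res key =>
      if key ∈ res then (redundancy_col.getD key []).foldl removeTry res
      else res) res
  PySem.List.sorted res (fun s => s) false

-- ===== PORT B =====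
-- the module-level dict redundancy_col of Source B, as its items() list
def redundancy_col_alt : List (String × List String) :=
  [("CP", ["Ex"]), ("IP", ["Ex"]), ("AllCol", ["CP", "IP", "PI1", "PI2", "Ex"])]

-- one step of B's filter pass: drop x if it still has removal budget, else keep it
def altStep (p : PySem.Dict String Int × List String) (x : String) :
    PySem.Dict String Int × List String :=
  if p.1.getD x 0 > 0 then (p.1.insert x (p.1.getD x 0 - 1), p.2)
  else (p.1, p.2 ++ [x])

def apply_redundancy_col_alt (scen : List String) : List String :=
  let budget := redundancy_col_alt.foldl
    (fun (b : PySem.Dict String Int) kv =>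
      if kv.1 ∈ scen then
        kv.2.foldl (fun b tag => b.insert tag (b.getD tag 0 + 1)) b
      else b)
    PySem.Dict.empty
  let st := scen.foldl altStep (budget, ([] : List String))
  PySem.List.sorted st.2 (fun s => s) false

-- ===== PRECONDITION & SPEC =====
def Spec_apply_redundancy_col (scen : List String) (out : List String) : Prop := out = apply_redundancy_col_alt scen
instance (scen : List String) (out : List String) : Decidable (Spec_apply_redundancy_col scen out) := by unfold Spec_apply_redundancy_col; infer_instance

-- ===== CLAIM (what is proved, stated in full; the proofs are below) =====
def Claim_equal_apply_redundancy_col : Prop := ∀ (scen : List String), Dom_apply_redundancy_col scen → Spec_apply_redundancy_col scen (apply_redundancy_col scen)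

-- ===== LEMMAS AND PROOFS =====

-- try/remove/except is exactly List.erase
theorem removeTry_eq_erase (l : List String) (v : String) : removeTry l v = l.erase v := by
  by_cases h : v ∈ l
  · simp [removeTry, PySem.List.remove?_eq_some_erase l v h]
  · simp [removeTry, (PySem.List.remove?_eq_none_iff l v).mpr h, List.erase_of_not_mem h]

-- membership survives erasing a different element
theorem mem_erase_ne {l : List String} {a b : String} (hab : a ≠ b) : a ∈ l.erase b ↔ a ∈ l := by
  constructor
  · intro h; exact List.mem_of_mem_erase h
  · intro h; exact List.mem_erase_of_ne hab |>.mpr h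

-- count of the output of B's filter pass, for any starting budget and accumulator
theorem altLoop_count (scen : List String) :
    ∀ (d : PySem.Dict String Int) (out : List String) (v : String),
      ((scen.foldl altStep (d, out)).2).count v
        = out.count v + (scen.count v - min (scen.count v) (d.getD v 0).toNat) := by
  induction scen with
  | nil => intro d out v; simp
  | cons x rest ih =>
    intro d out v
    rw [List.foldl_cons]
    by_cases h : d.getD x 0 > 0
    · rw [show altStep (d, out) x = (d.insert x (d.getD x 0 - 1), out) from by simp [altStep, h],
        ih, PySem.Dict.getD_insert]
      simp only [List.count_cons]
      by_cases hv : v = x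
      · subst hv
        simp only [beq_self_eq_true, if_true]
        omega
      · have hxv : (x == v) = false := by simpa using fun hh => hv hh.symm
        simp only [if_neg hv, hxv, Bool.false_eq_true, if_false]
        omega
    · rw [show altStep (d, out) x = (d, out ++ [x]) from by simp [altStep, h],
        ih, List.count_append]
      simp only [List.count_cons, List.count_nil]
      by_cases hv : v = x
      · subst hv
        have h0 : (d.getD v 0).toNat = 0 := by omega
        simp only [beq_self_eq_true, if_true, h0]
        omega
      · have hxv : (x == v) = false := by simpa using fun hh => hv hh.symm
        simp only [hxv, Bool.false_eq_true, if_false]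
        omega

-- A's result before sorting, written with List.erase and tests on the ORIGINAL scen
-- (no key is removed before its own membership test, so the tests agree with scen)
theorem portA_res (scen : List String) :
    (PySem.Dict.keys redundancy_col).foldl
      (fun res key =>
        if key ∈ res then (redundancy_col.getD key []).foldl removeTry res
        else res) scen
    = (let r1 := if "CP" ∈ scen then scen.erase "Ex" else scen
       let r2 := if "IP" ∈ scen then r1.erase "Ex" else r1
       if "AllCol" ∈ scen then
         ((((r2.erase "CP").erase "IP").erase "PI1").erase "PI2").erase "Ex"
       else r2) := by
  have hkeys : PySem.Dict.keys redundancy_col = ["CP", "IP", "AllCol"] := rfl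
  rw [hkeys]
  simp only [List.foldl_cons, List.foldl_nil]
  have hCPv : redundancy_col.getD "CP" [] = ["Ex"] := rfl
  have hIPv : redundancy_col.getD "IP" [] = ["Ex"] := rfl
  have hAllv : redundancy_col.getD "AllCol" [] = ["CP", "IP", "PI1", "PI2", "Ex"] := rfl
  rw [hCPv, hIPv, hAllv]
  simp only [List.foldl_cons, List.foldl_nil, removeTry_eq_erase]
  have h1 : ("IP" ∈ scen.erase "Ex") ↔ ("IP" ∈ scen) := mem_erase_ne (by decide)
  have h2 : ("AllCol" ∈ scen.erase "Ex") ↔ ("AllCol" ∈ scen) := mem_erase_ne (by decide)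
  have h3 : ("AllCol" ∈ (scen.erase "Ex").erase "Ex") ↔ ("AllCol" ∈ scen) := by
    rw [mem_erase_ne (by decide), h2]
  by_cases hCP : "CP" ∈ scen <;> by_cases hIP : "IP" ∈ scen <;> by_cases hAll : "AllCol" ∈ scen <;>
    simp [hCP, hIP, hAll, h1, h2, h3]

-- ===== VERDICT (by name: the statement is the Claim_ definition above) =====
set_option maxHeartbeats 2000000 in
theorem apply_redundancy_col_spec : Claim_equal_apply_redundancy_col := by
  intro scen _
  unfold Spec_apply_redundancy_col apply_redundancy_col apply_redundancy_col_alt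
  simp only []
  rw [portA_res]
  rw [PySem.List.sorted_id_eq_sorted_id_iff_perm]
  rw [List.perm_iff_count]
  intro v
  rw [altLoop_count]
  by_cases hCP : "CP" ∈ scen <;> by_cases hIP : "IP" ∈ scen <;> by_cases hAll : "AllCol" ∈ scen <;>
    by_cases hv1 : v = "Ex" <;> by_cases hv2 : v = "CP" <;> by_cases hv3 : v = "IP" <;>
    by_cases hv4 : v = "PI1" <;> by_cases hv5 : v = "PI2" <;>
    simp_all [redundancy_col_alt, PySem.Dict.getD_insert, PySem.Dict.getD_empty] <;>
    omega
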